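-- pv_equiv track=rewrite | github.com/juwkim/boj | 백준/Silver/11182. Kindergarten Excursion/Kindergarten Excursion.py | solve
-- ===== SOURCE A (Python) =====
-- def solve(s, c):
--     ret, l = 0, []
--     for i in range(len(s)):
--         if s[i] == c:
--             ret += len(l)
--         else:
--             l.append(s[i])
--     return ret, l
-- ===== SOURCE B (Python) =====
-- def solve(s, c):
--     C = sum(1 for ch in s if ch == c)
--     ret, l, cseen = 0, [], 0
--     for ch in s:
--         if ch == c:
--             cseen += 1
--         else:
--             l.append(ch)
--             ret += C - cseen
--     return ret, l
-- ===== Notes on version B (the rewrite author's own statement) =====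
-- stated objective: alternative
-- what changed: B first counts the total number C of target characters, then accumulates for each non-target character the number of targets still ahead (C - cseen), counting each crossing pair from the non-target side instead of adding len(l) on the target side.
import Mathlib
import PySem

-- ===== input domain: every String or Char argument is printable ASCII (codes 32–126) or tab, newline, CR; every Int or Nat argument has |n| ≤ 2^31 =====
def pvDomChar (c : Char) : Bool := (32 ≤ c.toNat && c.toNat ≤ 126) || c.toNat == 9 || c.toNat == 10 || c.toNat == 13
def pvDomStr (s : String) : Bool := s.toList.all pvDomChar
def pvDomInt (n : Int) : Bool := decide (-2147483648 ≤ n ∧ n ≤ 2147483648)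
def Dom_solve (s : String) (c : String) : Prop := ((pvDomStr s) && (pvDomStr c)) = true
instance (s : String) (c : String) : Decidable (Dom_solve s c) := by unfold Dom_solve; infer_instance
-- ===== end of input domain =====

-- B counts each crossing (non-target, later target) pair from the non-target side,
-- after a first pass computing the total target count; same result, alternative decomposition.

-- ===== PORT A =====
-- A's loop: state (ret, l); on s[i] == c add len(l) to ret, else append s[i] to l.
def solveLoopA (c : String) : List Char → Int → List String → Int × List String
  | [], ret, l => (ret, l)
  | x :: xs, ret, l =>
      if String.mk [x] = c then solveLoopA c xs (ret + l.length) l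
      else solveLoopA c xs ret (l ++ [String.mk [x]])

def solve (s : String) (c : String) : Int × List String :=
  solveLoopA c s.toList 0 []

-- ===== PORT B =====
-- first pass of B: C = sum(1 for ch in s if ch == c)
def solveCountB (c : String) : List Char → Int
  | [] => 0
  | x :: xs => (if String.mk [x] = c then 1 else 0) + solveCountB c xs

-- second pass of B: state (ret, l, cseen)
def solveLoopB (c : String) (C : Int) : List Char → Int → List String → Int → Int × List String
  | [], ret, l, _ => (ret, l)
  | x :: xs, ret, l, cseen =>
      if String.mk [x] = c then solveLoopB c C xs ret l (cseen + 1)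
      else solveLoopB c C xs (ret + (C - cseen)) (l ++ [String.mk [x]]) cseen

def solve_alt (s : String) (c : String) : Int × List String :=
  solveLoopB c (solveCountB c s.toList) s.toList 0 [] 0

-- ===== PRECONDITION & SPEC =====
def Spec_solve (s : String) (c : String) (out : Int × List String) : Prop := out = solve_alt s c
instance (s : String) (c : String) (out : Int × List String) : Decidable (Spec_solve s c out) := by unfold Spec_solve; infer_instance

-- ===== CLAIM (what is proved, stated in full; the proofs are below) =====
def Claim_equal_solve : Prop := ∀ (s : String) (c : String), Dom_solve s c → Spec_solve s c (solve s c)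

-- ===== LEMMAS AND PROOFS =====

-- crossing pairs counted from the right; keep = the kept non-target singletons
def pvCross (c : String) : List Char → Int
  | [] => 0
  | x :: xs => (if String.mk [x] = c then 0 else solveCountB c xs) + pvCross c xs

def pvKeep (c : String) : List Char → List String
  | [] => []
  | x :: xs => if String.mk [x] = c then pvKeep c xs else String.mk [x] :: pvKeep c xs

theorem loopA_eq (c : String) (xs : List Char) : ∀ (ret : Int) (l : List String),
    solveLoopA c xs ret l =
      (ret + (l.length : Int) * solveCountB c xs + pvCross c xs, l ++ pvKeep c xs) := by
  induction xs with
  | nil => intro ret l; simp [solveLoopA, solveCountB, pvCross, pvKeep]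
  | cons x xs ih =>
    intro ret l
    by_cases h : String.mk [x] = c
    · simp only [solveLoopA, solveCountB, pvCross, pvKeep, h, if_pos]
      rw [ih]
      simp only [Prod.mk.injEq]
      exact ⟨by push_cast; ring, trivial⟩
    · simp only [solveLoopA, solveCountB, pvCross, pvKeep, h, if_false]
      rw [ih]
      simp only [Prod.mk.injEq]
      exact ⟨by simp; push_cast; ring, by simp⟩

theorem loopB_eq (c : String) (C : Int) (xs : List Char) :
    ∀ (ret : Int) (l : List String) (cseen : Int), C = cseen + solveCountB c xs →
    solveLoopB c C xs ret l cseen = (ret + pvCross c xs, l ++ pvKeep c xs) := by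
  induction xs with
  | nil => intro ret l cseen _; simp [solveLoopB, pvCross, pvKeep]
  | cons x xs ih =>
    intro ret l cseen hC
    by_cases h : String.mk [x] = c
    · simp only [solveLoopB, pvCross, pvKeep, h, if_pos]
      rw [ih _ _ _ (by simp only [solveCountB, h, if_pos] at hC; omega)]
      simp
    · simp only [solveLoopB, pvCross, pvKeep, h, if_false]
      simp only [solveCountB, h, if_false] at hC
      rw [ih _ _ _ (by omega)]
      simp only [Prod.mk.injEq]
      exact ⟨by omega, by simp⟩

-- ===== VERDICT (by name: the statement is the Claim_ definition above) =====
theorem solve_spec : Claim_equal_solve := by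
  intro s c _
  unfold Spec_solve solve solve_alt
  rw [loopA_eq, loopB_eq c _ _ 0 [] 0 (by ring)]
  simp
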